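-- pv_equiv track=rewrite | github.com/allainclair/alg | freshbooks/t1.py | get_racks
-- ===== SOURCE A (Python) =====
-- def get_racks(bikes):
--     min_ = min(bikes)
--     max_ = max(bikes)
--     number_of_racks = (max_ - min_) + 1
--
--     rack_bins = [0]*number_of_racks
--     position_shift = min_
--     for bike_position in bikes:
--         shift_position = bike_position - position_shift
--         rack_bins[shift_position] = 1
--     return rack_bins
-- ===== SOURCE B (Python) =====
-- def get_racks(bikes):
--     positions = sorted(set(bikes))
--     out = [1]
--     for prev, cur in zip(positions, positions[1:]):
--         out.extend([0] * (cur - prev - 1))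
--         out.append(1)
--     return out
-- ===== Notes on version B (the rewrite author's own statement) =====
-- stated objective: alternative
-- what changed: B sorts the deduplicated bike positions and emits the bitmap as runs -- a 1 for each occupied position preceded by the zero-gap to its predecessor -- instead of scatter-writing 1s into a preallocated array indexed by shifted position.
import Mathlib
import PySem

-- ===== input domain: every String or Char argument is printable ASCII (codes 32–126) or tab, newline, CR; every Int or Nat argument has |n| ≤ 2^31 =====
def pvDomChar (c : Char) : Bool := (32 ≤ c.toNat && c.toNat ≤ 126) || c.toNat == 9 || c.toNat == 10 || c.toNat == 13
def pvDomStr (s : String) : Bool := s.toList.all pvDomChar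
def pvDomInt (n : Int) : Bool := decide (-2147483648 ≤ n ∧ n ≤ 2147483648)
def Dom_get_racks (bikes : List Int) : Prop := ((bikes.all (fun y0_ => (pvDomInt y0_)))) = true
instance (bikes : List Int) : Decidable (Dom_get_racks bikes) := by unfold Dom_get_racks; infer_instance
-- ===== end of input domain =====

-- B sorts the distinct positions and emits the bitmap run by run (gap of zeros, then a 1),
-- replacing A's scatter-writes into a preallocated array; alternative algorithm, similar cost.

-- ===== PORT A =====
def get_racks (bikes : List Int) : List Int :=
  match PySem.List.min? bikes (fun x => x), PySem.List.max? bikes (fun x => x) with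
  | some min_, some max_ =>
      let number_of_racks : Int := (max_ - min_) + 1
      let rack_bins : List Int := List.replicate number_of_racks.toNat 0
      bikes.foldl (fun acc bike_position =>
        PySem.List.pySetD acc (bike_position - min_) 1) rack_bins
  | _, _ => []   -- unreachable under Pre_ (min/max raise ValueError on [])

-- ===== PORT B =====
def get_racks_alt (bikes : List Int) : List Int :=
  let positions := PySem.List.sorted (PySem.Set.ofList bikes) (fun x => x) false
  -- for prev, cur in zip(positions, positions[1:]): out += [0]*(cur-prev-1); out += [1]
  (positions.zip (PySem.List.slice positions (some 1) none)).foldl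
    (fun out pc => (out ++ List.replicate (pc.2 - pc.1 - 1).toNat 0) ++ [1]) [1]

-- ===== PRECONDITION & SPEC =====
-- Pre_ excludes only the empty list, on which Python's min() raises ValueError.
def Pre_get_racks (bikes : List Int) : Prop := bikes ≠ []
instance (bikes : List Int) : Decidable (Pre_get_racks bikes) := by unfold Pre_get_racks; infer_instance
def pvWitness_get_racks : List Int := [3, 1, 3, 6]

def Spec_get_racks (bikes : List Int) (out : List Int) : Prop := out = get_racks_alt bikes
instance (bikes : List Int) (out : List Int) : Decidable (Spec_get_racks bikes out) := by unfold Spec_get_racks; infer_instance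

-- ===== CLAIM (what is proved, stated in full; the proofs are below) =====
def Claim_equal_get_racks : Prop := ∀ (bikes : List Int), Dom_get_racks bikes → Pre_get_racks bikes → Spec_get_racks bikes (get_racks bikes)

-- ===== LEMMAS AND PROOFS =====

-- the run emitted for one consecutive pair of occupied positions
def pvRun (pc : Int × Int) : List Int := List.replicate (pc.2 - pc.1 - 1).toNat 0 ++ [1]

-- B's fold is the initial [1] followed by the concatenation of the runs
theorem foldl_run_eq_flatMap (l : List (Int × Int)) (init : List Int) :
    l.foldl (fun out pc => (out ++ List.replicate (pc.2 - pc.1 - 1).toNat 0) ++ [1]) init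
      = init ++ l.flatMap pvRun := by
  induction l generalizing init with
  | nil => simp
  | cons p t ih =>
    rw [List.foldl_cons, ih, List.flatMap_cons]
    simp [pvRun, List.append_assoc]

-- t.getLastD c is an element of c :: t
theorem getLastD_mem (t : List Int) : ∀ c : Int, t.getLastD c ∈ c :: t := by
  induction t with
  | nil => intro c; simp
  | cons d t ih =>
    intro c
    rw [List.getLastD_cons]
    exact List.mem_cons_of_mem c (ih d)

-- in a strictly increasing c::t, every element is at most t.getLastD c
theorem pw_le_last (t : List Int) : ∀ (c : Int), (c :: t).Pairwise (· < ·) →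
    ∀ x ∈ c :: t, x ≤ t.getLastD c := by
  induction t with
  | nil => intro c _ x hx; simp at hx; simp [hx]
  | cons d t ih =>
    intro c hpw x hx
    have hcd : c < d := (List.pairwise_cons.mp hpw).1 d (by simp)
    have hpw' : (d :: t).Pairwise (· < ·) := (List.pairwise_cons.mp hpw).2
    rw [List.getLastD_cons]
    rcases List.mem_cons.mp hx with heq | hx
    · rw [heq]; exact le_trans (le_of_lt hcd) (ih d hpw' d (by simp))
    · exact ih d hpw' x hx

-- pointwise value of the concatenated runs over consecutive pairs of a strictly increasing c::t
theorem runs_getElem? (t : List Int) : ∀ (c : Int), (c :: t).Pairwise (· < ·) → ∀ k : ℕ,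
    (((c :: t).zip t).flatMap pvRun)[k]? =
      if k < (t.getLastD c - c).toNat then some (if ((k : Int) + c + 1) ∈ t then 1 else 0)
      else none := by
  induction t with
  | nil => intro c _ k; simp
  | cons d t ih =>
    intro c hpw k
    have hcd : c < d := (List.pairwise_cons.mp hpw).1 d (by simp)
    have hpw' : (d :: t).Pairwise (· < ·) := (List.pairwise_cons.mp hpw).2
    have hdle : ∀ x ∈ d :: t, d ≤ x := by
      intro x hx
      rcases List.mem_cons.mp hx with rfl | hx
      · exact le_refl x
      · exact le_of_lt ((List.pairwise_cons.mp hpw').1 x hx)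
    have hdlast : d ≤ t.getLastD d := pw_le_last t d hpw' d (by simp)
    have hzip : ((c :: d :: t).zip (d :: t)).flatMap pvRun
        = pvRun (c, d) ++ ((d :: t).zip t).flatMap pvRun := by
      simp [List.zip_cons_cons]
    rw [hzip, List.getLastD_cons]
    have hlen : (pvRun (c, d)).length = (d - c).toNat := by
      simp [pvRun]; omega
    by_cases h1 : k < (d - c - 1).toNat
    · -- inside the zero gap
      have hk : k < (pvRun (c, d)).length := by omega
      rw [List.getElem?_append_left hk]
      have hget : (pvRun (c, d))[k]? = some 0 := by
        have : k < (List.replicate (d - c - 1).toNat (0 : Int)).length := by simpa using h1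
        rw [pvRun, List.getElem?_append_left this, List.getElem?_replicate, if_pos h1]
      rw [hget, if_pos (by omega)]
      have hnm : ((k : Int) + c + 1) ∉ d :: t := by
        intro hm
        have := hdle _ hm
        omega
      rw [if_neg hnm]
    · by_cases h2 : k < (d - c).toNat
      · -- the 1 at position d
        have hk : k < (pvRun (c, d)).length := by omega
        rw [List.getElem?_append_left hk]
        have hkr : k = (d - c - 1).toNat := by omega
        have hget : (pvRun (c, d))[k]? = some 1 := by
          rw [pvRun, List.getElem?_append_right (by simp; omega)]
          simp [hkr]
        rw [hget, if_pos (by omega)]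
        have hm : ((k : Int) + c + 1) ∈ d :: t := by
          have : (k : Int) + c + 1 = d := by omega
          simp [this]
        rw [if_pos hm]
      · -- past this run: index into the remaining runs
        have hk : (pvRun (c, d)).length ≤ k := by omega
        rw [List.getElem?_append_right hk, hlen]
        rw [ih d hpw' (k - (d - c).toNat)]
        have hcast : ((k - (d - c).toNat : ℕ) : Int) + d + 1 = (k : Int) + c + 1 := by omega
        rw [hcast]
        by_cases h3 : k - (d - c).toNat < (t.getLastD d - d).toNat
        · have hmem : ((k : Int) + c + 1) ∈ t ↔ ((k : Int) + c + 1) ∈ d :: t := by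
            constructor
            · intro hq; exact List.mem_cons_of_mem d hq
            · intro hq
              rcases List.mem_cons.mp hq with heq | hq
              · omega
              · exact hq
          rw [if_pos h3, if_pos (show k < (t.getLastD d - c).toNat by omega)]
          simp only [hmem]
        · rw [if_neg h3, if_neg (by omega)]

-- A's scatter loop, characterised pointwise: after folding over l, slot k holds 1
-- iff k + min_ is a position in l, else whatever acc held.
theorem get_racks_foldl_getElem? (min_ max_ : Int) (l : List Int)
    (hl : ∀ b ∈ l, min_ ≤ b ∧ b ≤ max_) (acc : List Int)
    (hlen : acc.length = ((max_ - min_) + 1).toNat) (k : ℕ) :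
    (l.foldl (fun acc b => PySem.List.pySetD acc (b - min_) 1) acc)[k]? =
      if ((k : Int) + min_) ∈ l then (if k < acc.length then some 1 else none) else acc[k]? := by
  induction l generalizing acc with
  | nil => simp
  | cons b t ih =>
    obtain ⟨hb1, hb2⟩ := hl b (by simp)
    have hnn : (0 : Int) ≤ b - min_ := by omega
    have hidx : (b - min_).toNat < acc.length := by omega
    rw [List.foldl_cons, PySem.List.pySetD_of_nonneg acc 1 hnn,
        ih (fun x hx => hl x (by simp [hx])) _ (by simp [hlen])]
    rw [List.length_set]
    by_cases hm : ((k : Int) + min_) ∈ t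
    · simp [hm]
    · by_cases he : (k : Int) + min_ = b
      · have hk : k = (b - min_).toNat := by omega
        have hklt : k < acc.length := by omega
        have hmem : ((k : Int) + min_) ∈ b :: t := by simp [he]
        rw [if_neg hm, if_pos hmem, if_pos hklt, hk, List.getElem?_set_self hidx]
      · have hne : (b - min_).toNat ≠ k := by omega
        have hnmem : ((k : Int) + min_) ∉ b :: t := by simp [he, hm]
        rw [if_neg hm, if_neg hnmem, List.getElem?_set_ne hne]

theorem get_racks_spec_aux (bikes : List Int) (h : bikes ≠ []) :
    get_racks bikes = get_racks_alt bikes := by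
  obtain ⟨min_, hmin⟩ : ∃ m, PySem.List.min? bikes (fun x => x) = some m := by
    cases hc : PySem.List.min? bikes (fun x : Int => x) with
    | none => exact absurd ((PySem.List.min?_eq_none_iff bikes _).mp hc) h
    | some m => exact ⟨m, rfl⟩
  obtain ⟨max_, hmax⟩ : ∃ m, PySem.List.max? bikes (fun x => x) = some m := by
    cases hc : PySem.List.max? bikes (fun x : Int => x) with
    | none => exact absurd ((PySem.List.max?_eq_none_iff bikes _).mp hc) h
    | some m => exact ⟨m, rfl⟩
  have hlo : ∀ b ∈ bikes, min_ ≤ b := fun b hb => PySem.List.min?_isMin hmin b hb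
  have hhi : ∀ b ∈ bikes, b ≤ max_ := fun b hb => PySem.List.max?_isMax hmax b hb
  have hminmem : min_ ∈ bikes := PySem.List.min?_mem hmin
  have hmaxmem : max_ ∈ bikes := PySem.List.max?_mem hmax
  have hmm : min_ ≤ max_ := hhi min_ hminmem
  unfold get_racks get_racks_alt
  rw [hmin, hmax]
  simp only []
  set ps : List Int := PySem.List.sorted (PySem.Set.ofList bikes) (fun x => x) false with hps
  have hpw : ps.Pairwise (· < ·) := PySem.List.sorted_ofList_pairwise_lt bikes
  have hmemps : ∀ x : Int, x ∈ ps ↔ x ∈ bikes := by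
    intro x
    rw [hps, PySem.List.mem_sorted, PySem.Set.mem_ofList]
  obtain ⟨p0, rest, hcons⟩ : ∃ p0 rest, ps = p0 :: rest := by
    cases hc : ps with
    | nil => exact absurd ((hmemps min_).mpr hminmem) (by rw [hc]; simp)
    | cons a l => exact ⟨a, l, rfl⟩
  rw [hcons]
  have hpw' : (p0 :: rest).Pairwise (· < ·) := hcons ▸ hpw
  have hmem' : ∀ x : Int, x ∈ p0 :: rest ↔ x ∈ bikes := fun x => hcons ▸ hmemps x
  -- p0 = min_, last = max_
  have hp0 : p0 = min_ := by
    have h1 : min_ ≤ p0 := hlo p0 ((hmem' p0).mp (by simp))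
    have h2 : p0 ≤ min_ := by
      have hm : min_ ∈ p0 :: rest := (hmem' min_).mpr hminmem
      rcases List.mem_cons.mp hm with heq | hm
      · omega
      · exact le_of_lt ((List.pairwise_cons.mp hpw').1 min_ hm)
    omega
  have hlast : rest.getLastD p0 = max_ := by
    have hlm : rest.getLastD p0 ∈ p0 :: rest := getLastD_mem rest p0
    have h1 : rest.getLastD p0 ≤ max_ := hhi _ ((hmem' _).mp hlm)
    have h2 : max_ ≤ rest.getLastD p0 :=
      pw_le_last rest p0 hpw' max_ ((hmem' max_).mpr hmaxmem)
    omega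
  -- positions[1:] = rest
  have hslice : PySem.List.slice (p0 :: rest) (some 1) none = rest := by
    have := PySem.List.slice_from_natCast (p0 :: rest) 1
    simpa using this
  rw [hslice, foldl_run_eq_flatMap]
  apply List.ext_getElem?
  intro k
  rw [get_racks_foldl_getElem? min_ max_ bikes (fun b hb => ⟨hlo b hb, hhi b hb⟩)
      (List.replicate ((max_ - min_) + 1).toNat 0) (by simp) k]
  rw [List.length_replicate]
  cases k with
  | zero =>
    have hm : ((0 : ℕ) : Int) + min_ ∈ bikes := by simpa using hminmem
    rw [if_pos hm, if_pos (by omega)]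
    simp
  | succ k =>
    have hB : ([(1 : Int)] ++ ((p0 :: rest).zip rest).flatMap pvRun)[k + 1]?
        = (((p0 :: rest).zip rest).flatMap pvRun)[k]? := by
      simp
    rw [hB, runs_getElem? rest p0 hpw' k, hlast, hp0]
    have hcast : (k : Int) + min_ + 1 = ((k + 1 : ℕ) : Int) + min_ := by push_cast; omega
    have hmem : ((k : Int) + min_ + 1) ∈ rest ↔ (((k + 1 : ℕ) : Int) + min_) ∈ bikes := by
      rw [hcast]
      constructor
      · intro hr
        exact (hmem' _).mp (List.mem_cons_of_mem p0 hr)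
      · intro hb
        have hpb := (hmem' _).mpr hb
        rcases List.mem_cons.mp hpb with heq | hr
        · omega
        · exact hr
    by_cases hlt : k < (max_ - min_).toNat
    · rw [if_pos hlt]
      by_cases hm : (((k + 1 : ℕ) : Int) + min_) ∈ bikes
      · rw [if_pos (hmem.mpr hm), if_pos hm, if_pos (by omega)]
      · rw [if_neg (fun hr => hm (hmem.mp hr)), if_neg hm,
            List.getElem?_replicate, if_pos (by omega)]
    · rw [if_neg hlt]
      have hm : ¬ (((k + 1 : ℕ) : Int) + min_) ∈ bikes := by
        intro hm
        have := hhi _ hm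
        omega
      rw [if_neg hm, List.getElem?_replicate, if_neg (by omega)]

-- ===== VERDICT (by name: the statement is the Claim_ definition above) =====
theorem get_racks_spec : Claim_equal_get_racks := by
  intro bikes _ hpre
  exact get_racks_spec_aux bikes hpre
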